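-- pv_equiv track=rewrite | github.com/Medyan-Naser/financial_data_tool | data-collection/scripts/helpers.py | find_extreme_index_element
-- ===== SOURCE A (Python) =====
-- def find_extreme_index_element(list1, list2, find_highest=False):
--     """
--     This function returns the element from list2 that has the highest or lowest index in list1.
--
--     Parameters:
--     list1 (list): The list to search through.
--     list2 (list): The list of elements to find in list1.
--     find_highest (bool): If True, find the element with the highest index. If False, find the element with the lowest index.
--
--     Returns:
--     element: The element from list2 that has the highest or lowest index in list1.
--     """
--     if not list2:
--         return None  # Return None if list2 is empty
--
--     # Initialize the variables to store the result
--     extreme_index = -1 if find_highest else float('inf')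
--     extreme_element = None
--
--     for element in list2:
--         if element in list1:
--             index = list1.index(element)
--             if (find_highest and index > extreme_index) or (not find_highest and index < extreme_index):
--                 extreme_index = index
--                 extreme_element = element
--
--     return extreme_element
-- ===== SOURCE B (Python) =====
-- def find_extreme_index_element(list1, list2, find_highest=False):
--     if find_highest:
--         # scan list1 from the end; a hit counts only at a value's FIRST occurrence,
--         # since A ranks elements by their first index in list1
--         for i in range(len(list1) - 1, -1, -1):
--             x = list1[i]
--             if x in list2 and x not in list1[:i]:
--                 return x
--     else:
--         for x in list1:
--             if x in list2:
--                 return x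
--     return None
-- ===== Notes on version B (the rewrite author's own statement) =====
-- stated objective: faster
-- what changed: A scans all of list2 and calls list1.index (an inner scan) for every member; B instead scans list1 itself once in index order (forward for lowest, backward for highest, counting only a value's first occurrence) and returns at the first hit, short-circuiting.
import Mathlib
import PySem

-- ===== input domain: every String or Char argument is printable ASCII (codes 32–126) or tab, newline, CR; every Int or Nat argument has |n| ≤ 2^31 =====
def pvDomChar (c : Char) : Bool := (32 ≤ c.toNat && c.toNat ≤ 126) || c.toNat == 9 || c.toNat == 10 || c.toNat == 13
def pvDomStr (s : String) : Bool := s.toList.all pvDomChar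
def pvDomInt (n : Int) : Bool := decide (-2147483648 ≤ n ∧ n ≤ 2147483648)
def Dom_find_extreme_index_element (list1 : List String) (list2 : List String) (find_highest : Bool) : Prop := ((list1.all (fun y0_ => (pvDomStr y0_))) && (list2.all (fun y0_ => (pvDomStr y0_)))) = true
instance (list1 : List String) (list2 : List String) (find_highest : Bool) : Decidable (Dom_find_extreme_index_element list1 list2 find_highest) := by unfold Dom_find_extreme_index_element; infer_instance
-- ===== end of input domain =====

-- B replaces A's scan of list2 with inner list1.index calls by a single short-circuiting
-- scan of list1 itself (forward for lowest index, backward for highest, counting only a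
-- value's first occurrence); objective: a different, early-exiting algorithm.


-- ===== PORT A =====
-- A's loop body over state (extreme_index, extreme_element); the sentinels -1 / float('inf')
-- are modelled by `none` in the first component: indices are ≥ 0, so in Python the first
-- comparison against the sentinel always succeeds, exactly as the `none` branch does here.
def pvAStep (list1 : List String) (find_highest : Bool)
    (st : Option Nat × Option String) (element : String) : Option Nat × Option String :=
  if list1.contains element then
    match PySem.List.index? list1 element with
    | some index =>
        (match st.1 with
         | none => (some index, some element)
         | some e =>
             if (find_highest && decide (e < index)) || (!find_highest && decide (index < e)) then
               (some index, some element)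
             else st)
    | none => st
  else st

def find_extreme_index_element (list1 : List String) (list2 : List String) (find_highest : Bool) : Option String :=
  if list2 = [] then none
  else (list2.foldl (pvAStep list1 find_highest) (none, none)).2

-- ===== PORT B =====
-- forward scan of list1: first element that is in list2
def pvBFwd (list2 : List String) : List String → Option String
  | [] => none
  | x :: rest => if list2.contains x then some x else pvBFwd list2 rest

-- backward scan: i runs len-1, …, 0 (pvBRev is called with n = len and reads index n-1 first);
-- `list1.getD i ""` is exact for Python's list1[i] since i is always in range here,
-- and `x not in list1[:i]` is the take-i containment test.
def pvBRev (list1 list2 : List String) : Nat → Option String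
  | 0 => none
  | i + 1 =>
      if list2.contains (list1.getD i "") && !((list1.take i).contains (list1.getD i "")) then
        some (list1.getD i "")
      else pvBRev list1 list2 i

def find_extreme_index_element_alt (list1 : List String) (list2 : List String) (find_highest : Bool) : Option String :=
  if find_highest then pvBRev list1 list2 list1.length else pvBFwd list2 list1

-- ===== PRECONDITION & SPEC =====
def Spec_find_extreme_index_element (list1 : List String) (list2 : List String) (find_highest : Bool) (out : Option String) : Prop := out = find_extreme_index_element_alt list1 list2 find_highest
instance (list1 : List String) (list2 : List String) (find_highest : Bool) (out : Option String) : Decidable (Spec_find_extreme_index_element list1 list2 find_highest out) := by unfold Spec_find_extreme_index_element; infer_instance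

-- ===== CLAIM (what is proved, stated in full; the proofs are below) =====
def Claim_equal_find_extreme_index_element : Prop := ∀ (list1 : List String) (list2 : List String) (find_highest : Bool), Dom_find_extreme_index_element list1 list2 find_highest → Spec_find_extreme_index_element list1 list2 find_highest (find_extreme_index_element list1 list2 find_highest)

-- ===== LEMMAS AND PROOFS =====

-- the first indices (in list1) of the members of list2 that occur in list1
def pvIdxs (list1 l2 : List String) : List Nat :=
  l2.filterMap (fun x => PySem.List.index? list1 x)

-- index-only version of A's loop body
def pvIdxStep (list1 : List String) (find_highest : Bool) (o : Option Nat) (x : String) : Option Nat :=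
  if list1.contains x then
    match PySem.List.index? list1 x with
    | some j =>
        (match o with
         | none => some j
         | some e => if (find_highest && decide (e < j)) || (!find_highest && decide (j < e)) then some j else o)
    | none => o
  else o

def pvComb (fh : Bool) (o : Option Nat) (j : Nat) : Option Nat :=
  match o with
  | none => some j
  | some e => if (fh && decide (e < j)) || (!fh && decide (j < e)) then some j else some e

-- first index of the element sitting at position q is at most q
lemma pv_idx_le (l : List String) (q : Nat) (hq : q < l.length) :
    ∃ k, PySem.List.index? l l[q] = some k ∧ k ≤ q := by
  have hmem : l[q] ∈ l := List.getElem_mem hq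
  have hs : (PySem.List.index? l l[q]).isSome = true :=
    (PySem.List.index?_isSome_iff l l[q]).mpr hmem
  obtain ⟨k, hk⟩ := Option.isSome_iff_exists.mp hs
  obtain ⟨hkl, hval, hfirst⟩ := PySem.List.getElem_of_index?_eq_some hk
  refine ⟨k, hk, ?_⟩
  by_contra hqk
  exact hfirst q (by omega) rfl

-- a position whose value does not occur earlier is the first index of that value
lemma pv_index?_of_first (l : List String) (i : Nat) (hi : i < l.length)
    (hnot : l[i] ∉ l.take i) : PySem.List.index? l l[i] = some i := by
  rw [PySem.List.index?_eq_some_iff]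
  refine ⟨l.take i, l.drop (i + 1), ?_, ?_, hnot⟩
  · conv_lhs => rw [← List.take_append_drop i l]
    rw [List.getElem_cons_drop]
  · simp [List.length_take]; omega

lemma pv_not_mem_take_of_index? (l : List String) (v : String) (i : Nat)
    (h : PySem.List.index? l v = some i) : v ∉ l.take i := by
  obtain ⟨hi, hval, hfirst⟩ := PySem.List.getElem_of_index?_eq_some h
  intro hmem
  obtain ⟨q, hq, hqv⟩ := List.mem_iff_getElem.mp hmem
  have hql : q < l.length ∧ q < i := by
    constructor <;> (have := hq; simp only [List.length_take] at this; omega)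
  have hv : l[q]'hql.1 = v := by
    rw [← hqv]; simp [List.getElem_take]
  exact hfirst q hql.2 hv

-- the second component of A's state follows the first
lemma pvA_fold_snd (list1 : List String) (fh : Bool) :
    ∀ (l2 : List String) (st : Option Nat × Option String),
      st.2 = st.1.map (fun i => list1.getD i "") →
      (l2.foldl (pvAStep list1 fh) st).2
        = (l2.foldl (pvIdxStep list1 fh) st.1).map (fun i => list1.getD i "") := by
  intro l2
  induction l2 with
  | nil => intro st h; simpa using h
  | cons x xs ih =>
      intro st h
      have h1 : (pvAStep list1 fh st x).2 = (pvAStep list1 fh st x).1.map (fun i => list1.getD i "") := by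
        unfold pvAStep
        split
      -- contains = true
        · split
          -- index? = some index
          · next index heq =>
              obtain ⟨hjl, hval, _⟩ := PySem.List.getElem_of_index?_eq_some heq
              have hg : list1.getD index "" = x := by
                rw [List.getD_eq_getElem _ _ hjl, hval]
              split
              · simp only [Option.map_some]
                rw [hg]
              · next e hst =>
                  split
                  · simp only [Option.map_some]
                    rw [hg]
                  · rw [hst] at h
                    exact h.trans (by rw [hst])
          -- index? = none
          · exact h
        · exact h
      have h2 : (pvAStep list1 fh st x).1 = pvIdxStep list1 fh st.1 x := by
        unfold pvAStep pvIdxStep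
        split
        · split
          · split
            · rfl
            · split <;> rfl
          · rfl
        · rfl
      simp only [List.foldl_cons]
      rw [ih _ h1, h2]

-- A's index fold, restricted to the indices that actually occur
lemma pvA_fold_to_idxs (list1 : List String) (fh : Bool) :
    ∀ (l2 : List String) (o : Option Nat),
      l2.foldl (pvIdxStep list1 fh) o = (pvIdxs list1 l2).foldl (pvComb fh) o := by
  intro l2
  induction l2 with
  | nil => intro o; rfl
  | cons x xs ih =>
      intro o
      cases hidx : PySem.List.index? list1 x with
      | none =>
          have hc : list1.contains x = false := by
            have hnm : x ∉ list1 := by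
              rw [← PySem.List.index?_eq_none_iff (xs := list1) (v := x)]; exact hidx
            exact Bool.eq_false_iff.mpr (fun hcc => hnm (List.contains_iff_mem.mp hcc))
          have hstep : pvIdxStep list1 fh o x = o := by
            unfold pvIdxStep; rw [hc]; rfl
          have hfm : pvIdxs list1 (x :: xs) = pvIdxs list1 xs := by
            unfold pvIdxs
            rw [List.filterMap_cons_none]
            exact hidx
          rw [List.foldl_cons, hstep, hfm, ih]
      | some j =>
          have hc : list1.contains x = true := by
            have hs : (PySem.List.index? list1 x).isSome = true := by rw [hidx]; rfl
            exact List.contains_iff_mem.mpr ((PySem.List.index?_isSome_iff list1 x).mp hs)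
          have hstep : pvIdxStep list1 fh o x = pvComb fh o j := by
            unfold pvIdxStep pvComb
            rw [hc, hidx]
            cases o <;> rfl
          have hfm : pvIdxs list1 (x :: xs) = j :: pvIdxs list1 xs := by
            unfold pvIdxs
            rw [List.filterMap_cons_some]
            exact hidx
          rw [List.foldl_cons, hstep, hfm, List.foldl_cons, ih]

lemma pvComb_min_some : ∀ (L : List Nat) (e : Nat), L.foldl (pvComb false) (some e) = some (L.foldl min e) := by
  intro L
  induction L with
  | nil => intro e; rfl
  | cons j js ih =>
      intro e
      have hstep : pvComb false (some e) j = some (min e j) := by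
        unfold pvComb
        by_cases h : j < e
        · simp [h, Nat.min_eq_right h.le]
        · simp [h, Nat.min_eq_left (Nat.not_lt.mp h)]
      rw [List.foldl_cons, hstep, ih, List.foldl_cons]

lemma pvComb_min_none (L : List Nat) : L.foldl (pvComb false) none = L.min? := by
  cases L with
  | nil => rfl
  | cons a as =>
      rw [List.foldl_cons]
      have h0 : pvComb false none a = some a := rfl
      rw [h0, pvComb_min_some]
      rfl

lemma pvComb_max_some : ∀ (L : List Nat) (e : Nat), L.foldl (pvComb true) (some e) = some (L.foldl max e) := by
  intro L
  induction L with
  | nil => intro e; rfl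
  | cons j js ih =>
      intro e
      have hstep : pvComb true (some e) j = some (max e j) := by
        unfold pvComb
        by_cases h : e < j
        · simp [h, Nat.max_eq_right h.le]
        · simp [h, Nat.max_eq_left (Nat.not_lt.mp h)]
      rw [List.foldl_cons, hstep, ih, List.foldl_cons]

lemma pvComb_max_none (L : List Nat) : L.foldl (pvComb true) none = L.max? := by
  cases L with
  | nil => rfl
  | cons a as =>
      rw [List.foldl_cons]
      have h0 : pvComb true none a = some a := rfl
      rw [h0, pvComb_max_some]
      rfl

-- B, forward scan
lemma pvBFwd_eq_none (l2 : List String) :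
    ∀ (l : List String), (∀ x ∈ l, x ∉ l2) → pvBFwd l2 l = none := by
  intro l
  induction l with
  | nil => intro _; rfl
  | cons x xs ih =>
      intro h
      have hc : ¬ (l2.contains x = true) :=
        fun hcc => h x (by simp) (List.contains_iff_mem.mp hcc)
      unfold pvBFwd
      rw [if_neg hc]
      exact ih (fun y hy => h y (List.mem_cons_of_mem _ hy))

lemma pvBFwd_eq_some (l2 : List String) :
    ∀ (l : List String) (p : Nat) (hp : p < l.length), l[p] ∈ l2 →
      (∀ q (hq : q < l.length), q < p → l[q] ∉ l2) → pvBFwd l2 l = some l[p] := by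
  intro l
  induction l with
  | nil => intro p hp; simp at hp
  | cons x xs ih =>
      intro p hp hmem hmin
      by_cases hx : x ∈ l2
      · have hp0 : p = 0 := by
          by_contra hne
          exact hmin 0 (by simp) (by omega) (by simpa using hx)
        subst hp0
        unfold pvBFwd
        rw [if_pos (List.contains_iff_mem.mpr hx)]
        simp
      · have hpne : p ≠ 0 := by
          intro h0; subst h0; exact hx (by simpa using hmem)
        obtain ⟨q, rfl⟩ : ∃ q, p = q + 1 := ⟨p - 1, by omega⟩
        unfold pvBFwd
        rw [if_neg (fun hcc => hx (List.contains_iff_mem.mp hcc))]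
        have hq : q < xs.length := by simpa using hp
        have hrec := ih q hq (by simpa using hmem)
          (fun r hr hrq => by simpa using hmin (r + 1) (by simpa using Nat.succ_lt_succ hr) (by omega))
        rw [hrec]
        simp

-- B, backward scan
lemma pvBRev_eq_none (list1 l2 : List String) (h : ∀ x ∈ list1, x ∉ l2) :
    ∀ n, n ≤ list1.length → pvBRev list1 l2 n = none := by
  intro n
  induction n with
  | zero => intro _; rfl
  | succ i ih =>
      intro hn
      have hi : i < list1.length := by omega
      have hx : list1.getD i "" ∈ list1 := by
        rw [List.getD_eq_getElem _ _ hi]; exact List.getElem_mem hi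
      have hc : l2.contains (list1.getD i "") = false :=
        Bool.eq_false_iff.mpr (fun hcc => h _ hx (List.contains_iff_mem.mp hcc))
      unfold pvBRev
      rw [hc]
      exact ih (by omega)

lemma pvBRev_eq_some (list1 l2 : List String) (j : Nat)
    (hmem : list1.getD j "" ∈ l2)
    (hidx : PySem.List.index? list1 (list1.getD j "") = some j) :
    ∀ n, n ≤ list1.length → j < n →
      (∀ q, j < q → q < n →
        ¬(list1.getD q "" ∈ l2 ∧ PySem.List.index? list1 (list1.getD q "") = some q)) →
      pvBRev list1 l2 n = some (list1.getD j "") := by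
  intro n
  induction n with
  | zero => intro _ hj; omega
  | succ i ih =>
      intro hn hj hmax
      by_cases hji : j = i
      · subst hji
        have hnot : list1.getD j "" ∉ list1.take j := pv_not_mem_take_of_index? _ _ _ hidx
        have hc1 : l2.contains (list1.getD j "") = true := List.contains_iff_mem.mpr hmem
        have hc2 : (list1.take j).contains (list1.getD j "") = false :=
          Bool.eq_false_iff.mpr (fun hcc => hnot (List.contains_iff_mem.mp hcc))
        unfold pvBRev
        rw [hc1, hc2]
        rfl
      · have hji' : j < i := by omega
        have hi : i < list1.length := by omega
        have hgi : list1.getD i "" = list1[i] := List.getD_eq_getElem _ _ hi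
        have hcond : (l2.contains (list1.getD i "") && !((list1.take i).contains (list1.getD i ""))) = false := by
          by_contra hcc
          rw [Bool.not_eq_false, Bool.and_eq_true, Bool.not_eq_true'] at hcc
          obtain ⟨hc1, hc2⟩ := hcc
          have hmem2 : list1.getD i "" ∈ l2 := List.contains_iff_mem.mp hc1
          have hnot : list1.getD i "" ∉ list1.take i :=
            fun hm => by rw [List.contains_iff_mem.mpr hm] at hc2; simp at hc2
          have hidx2 : PySem.List.index? list1 (list1.getD i "") = some i := by
            rw [hgi]
            exact pv_index?_of_first list1 i hi (hgi ▸ hnot)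
          exact hmax i hji' (by omega) ⟨hmem2, hidx2⟩
        unfold pvBRev
        rw [hcond]
        exact ih (by omega) hji' (fun q h1 h2 => hmax q h1 (by omega))

-- membership in pvIdxs
lemma pv_mem_idxs (list1 l2 : List String) (k : Nat) :
    k ∈ pvIdxs list1 l2 ↔ ∃ x ∈ l2, PySem.List.index? list1 x = some k := by
  unfold pvIdxs; exact List.mem_filterMap

-- no common element of list1 and l2 means pvIdxs is inhabited-free; contrapositive helper
lemma pv_no_common (list1 l2 : List String) (hL : pvIdxs list1 l2 = []) :
    ∀ x ∈ list1, x ∉ l2 := by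
  intro x hx1 hx2
  obtain ⟨p, hp, hpv⟩ := List.mem_iff_getElem.mp hx1
  obtain ⟨k, hk, -⟩ := pv_idx_le list1 p hp
  rw [hpv] at hk
  have hkL : k ∈ pvIdxs list1 l2 := (pv_mem_idxs list1 l2 k).mpr ⟨x, hx2, hk⟩
  rw [hL] at hkL
  simp at hkL

-- ===== VERDICT (by name: the statement is the Claim_ definition above) =====
theorem find_extreme_index_element_spec : Claim_equal_find_extreme_index_element := by
  intro list1 l2 fh _
  unfold Spec_find_extreme_index_element
  by_cases h2 : l2 = []
  · subst h2
    unfold find_extreme_index_element find_extreme_index_element_alt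
    cases fh with
    | false => simp [pvBFwd_eq_none [] list1 (by simp)]
    | true => simp [pvBRev_eq_none list1 [] (by simp) list1.length le_rfl]
  · unfold find_extreme_index_element find_extreme_index_element_alt
    rw [if_neg h2]
    rw [pvA_fold_snd list1 fh l2 (none, none) rfl, pvA_fold_to_idxs]
    cases fh with
    | false =>
        rw [pvComb_min_none]
        cases hm : (pvIdxs list1 l2).min? with
        | none =>
            have hL : pvIdxs list1 l2 = [] := List.min?_eq_none_iff.mp hm
            have hB : pvBFwd l2 list1 = none := pvBFwd_eq_none l2 list1 (pv_no_common list1 l2 hL)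
            simp [hB]
        | some j =>
            obtain ⟨hjL, hmin⟩ := List.min?_eq_some_iff.mp hm
            obtain ⟨x, hxl2, hxidx⟩ := (pv_mem_idxs list1 l2 j).mp hjL
            obtain ⟨hjlen, hval, hfirst⟩ := PySem.List.getElem_of_index?_eq_some hxidx
            have hB := pvBFwd_eq_some l2 list1 j hjlen (by rw [hval]; exact hxl2) ?_
            · rw [hB]
              simp only [Option.map_some, Bool.false_eq_true, if_false]
              rw [List.getD_eq_getElem _ _ hjlen]
            · intro q hq hqj hmem2
              obtain ⟨k, hk, hkq⟩ := pv_idx_le list1 q hq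
              have hkL : k ∈ pvIdxs list1 l2 := (pv_mem_idxs list1 l2 k).mpr ⟨list1[q], hmem2, hk⟩
              have := hmin k hkL
              omega
    | true =>
        rw [pvComb_max_none]
        cases hm : (pvIdxs list1 l2).max? with
        | none =>
            have hL : pvIdxs list1 l2 = [] := List.max?_eq_none_iff.mp hm
            have hB : pvBRev list1 l2 list1.length = none :=
              pvBRev_eq_none list1 l2 (pv_no_common list1 l2 hL) list1.length le_rfl
            simp [hB]
        | some j =>
            obtain ⟨hjL, hmax⟩ := List.max?_eq_some_iff.mp hm
            obtain ⟨x, hxl2, hxidx⟩ := (pv_mem_idxs list1 l2 j).mp hjL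
            obtain ⟨hjlen, hval, hfirst⟩ := PySem.List.getElem_of_index?_eq_some hxidx
            have hg : list1.getD j "" = x := by rw [List.getD_eq_getElem _ _ hjlen, hval]
            have hB := pvBRev_eq_some list1 l2 j (hg ▸ hxl2) (by rw [hg]; exact hxidx)
              list1.length le_rfl hjlen ?_
            · rw [hB]
              simp only [Option.map_some, if_true]
            · intro q hjq hqlen hqc
              obtain ⟨hq2, hqidx⟩ := hqc
              have hkL : q ∈ pvIdxs list1 l2 := (pv_mem_idxs list1 l2 q).mpr ⟨list1.getD q "", hq2, hqidx⟩
              have := hmax q hkL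
              omega
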